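-- pv_equiv track=rewrite | github.com/CamNagle24/Wordle | Code/wordle.py | known_word
-- ===== SOURCE A (Python) =====
-- def known_word(clues):
--     """Takes a list of guesses taken and clues recieved in tuples as the element. It returns a string what we know about the secret with the green hints"""
--     clues = dict(clues)
--     list_output = ['_'] * 5
--     str_output = ""
--     #For each dictionary pair in clues add if we know that the letter is green to a list
--     for i in clues:
--         k = 0
--         for j in clues[i]:
--             if(k < 5):
--                 guess = i
--                 if(j == "yellow" or j == "grey"):
--                     k += 1
--                 else:
--                     list_output[k] = guess[k]
--                     k += 1
--     #Make a string with the _ or letter known and return it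
--     for i in range(len(list_output)):
--         str_output = str_output + list_output[i]
--     return str_output
-- ===== SOURCE B (Python) =====
-- def known_word(clues):
--     """Takes a list of guesses taken and clues recieved in tuples as the element. It returns a string what we know about the secret with the green hints"""
--     d = dict(clues)
--
--     def letter_at(k):
--         ch = '_'
--         for guess, colors in d.items():
--             if k < len(colors) and colors[k] != "yellow" and colors[k] != "grey":
--                 ch = guess[k]
--         return ch
--
--     return "".join(letter_at(k) for k in range(5))
-- ===== Notes on version B (the rewrite author's own statement) =====
-- stated objective: alternative
-- what changed: B transposes A's row-major sweep (for each deduped guess, walk its clue list writing letters into a mutable 5-slot buffer) into a column-major scan: for each of the 5 positions it scans the dict items once, keeping the letter of the last guess whose clue at that position is green, and joins the 5 characters.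
import Mathlib
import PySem

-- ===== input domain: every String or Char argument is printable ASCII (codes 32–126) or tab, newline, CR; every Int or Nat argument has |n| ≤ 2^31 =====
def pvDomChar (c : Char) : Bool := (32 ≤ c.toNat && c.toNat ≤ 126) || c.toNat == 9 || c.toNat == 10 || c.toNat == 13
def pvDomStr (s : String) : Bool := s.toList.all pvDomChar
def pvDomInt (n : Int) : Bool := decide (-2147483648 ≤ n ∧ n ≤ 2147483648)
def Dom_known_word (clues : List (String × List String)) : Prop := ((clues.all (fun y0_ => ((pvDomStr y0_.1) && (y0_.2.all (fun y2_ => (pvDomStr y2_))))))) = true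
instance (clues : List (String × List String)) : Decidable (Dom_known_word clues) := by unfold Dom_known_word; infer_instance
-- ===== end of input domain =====

-- B changes the traversal: column-major per-position scans instead of A's row-major buffer updates; same cost, different decomposition.
-- Equivalence is about the return value; neither program mutates its argument.

-- ===== PORT A =====
-- inner loop: 'k = 0; for j in clues[i]: if k < 5: ...' — list_output is `out`, guess is `g`
def kwInner (out : List Char) (g : String) (k : Nat) : List String → List Char
  | [] => out
  | j :: rest =>
    if k < 5 then
      if j == "yellow" || j == "grey" then kwInner out g (k + 1) rest
      else kwInner (out.set k ((PySem.Str.pyGet? g (k : Int)).getD '?')) g (k + 1) rest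
    else kwInner out g k rest

def known_word (clues : List (String × List String)) : String :=
  let d := PySem.Dict.ofList clues
  let lst := d.items.foldl (fun acc p => kwInner acc p.1 0 p.2) ['_', '_', '_', '_', '_']
  -- 'for i in range(len(list_output)): str_output = str_output + list_output[i]'
  String.mk ((List.range lst.length).foldl (fun s i => s ++ [(lst[i]?.getD '?')]) [])

-- ===== PORT B =====
-- one item step of letter_at's scan: 'if k < len(colors) and colors[k] != "yellow" and colors[k] != "grey": ch = guess[k]'
def kwColStep (k : Nat) (c : Char) (p : String × List String) : Char :=
  match p.2[k]? with
  | some j => if j == "yellow" || j == "grey" then c else (PySem.Str.pyGet? p.1 (k : Int)).getD '?'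
  | none => c

def kwColLetter (items : List (String × List String)) (k : Nat) : Char :=
  items.foldl (kwColStep k) '_'

def known_word_alt (clues : List (String × List String)) : String :=
  let d := PySem.Dict.ofList clues
  String.mk ((List.range 5).map (kwColLetter d.items))

-- ===== PRECONDITION & SPEC =====
-- Pre_ excludes exactly the inputs where Python A raises IndexError: some deduped guess has a
-- non-yellow/non-grey clue at a position < 5 that exceeds the guess's own length (B raises there too).
def Pre_known_word (clues : List (String × List String)) : Prop :=
  ∀ p ∈ (PySem.Dict.ofList clues).items, ∀ k ∈ List.range (min 5 p.2.length),
    ¬(p.2.getD k "" = "yellow" ∨ p.2.getD k "" = "grey") → k < p.1.toList.length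
instance (clues : List (String × List String)) : Decidable (Pre_known_word clues) := by unfold Pre_known_word; infer_instance

def pvWitness_known_word : (List (String × List String)) :=
  [("crane", ["green", "grey", "yellow", "grey", "grey"]), ("slate", ["grey", "grey", "green", "grey", "green"])]

def Spec_known_word (clues : List (String × List String)) (out : String) : Prop := out = known_word_alt clues
instance (clues : List (String × List String)) (out : String) : Decidable (Spec_known_word clues out) := by unfold Spec_known_word; infer_instance

-- ===== CLAIM (what is proved, stated in full; the proofs are below) =====
def Claim_equal_known_word : Prop := ∀ (clues : List (String × List String)), Dom_known_word clues → Pre_known_word clues → Spec_known_word clues (known_word clues)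

-- ===== LEMMAS AND PROOFS =====

theorem kwInner_length (g : String) (cs : List String) : ∀ (out : List Char) (k : Nat),
    (kwInner out g k cs).length = out.length := by
  induction cs with
  | nil => intro out k; rfl
  | cons j rest ih =>
    intro out k
    simp only [kwInner]
    split_ifs with h1 h2 <;> simp [ih]

-- what A's inner loop does to the single slot t (< 5): exactly one kwColStep, provided out has 5 slots
theorem kwInner_get (g : String) (t : Nat) (ht : t < 5) (cs : List String) :
    ∀ (out : List Char) (k0 : Nat), out.length = 5 →
    (kwInner out g k0 cs)[t]? =
      if k0 ≤ t then
        (match cs[t - k0]? with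
          | some j => if j == "yellow" || j == "grey" then out[t]?
                      else some ((PySem.Str.pyGet? g (t : Int)).getD '?')
          | none => out[t]?)
      else out[t]? := by
  induction cs with
  | nil => intro out k0 _; simp [kwInner]
  | cons j rest ih =>
    intro out k0 hlen
    simp only [kwInner]
    by_cases h5 : k0 < 5
    · simp only [h5, if_true]
      by_cases hyg : (j == "yellow" || j == "grey") = true
      · rw [hyg, if_pos rfl, ih out (k0 + 1) hlen]
        rcases Nat.lt_trichotomy k0 t with hlt | heq | hgt
        · have h1 : k0 + 1 ≤ t := hlt
          have h2 : k0 ≤ t := Nat.le_of_lt hlt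
          have hsub : t - k0 = (t - (k0 + 1)) + 1 := by omega
          simp [h1, h2, hsub]
        · subst heq
          simp [hyg]
        · have h1 : ¬ (k0 + 1 ≤ t) := by omega
          have h2 : ¬ (k0 ≤ t) := by omega
          simp [h1, h2]
      · rw [if_neg hyg]
        have hlen' : (out.set k0 ((PySem.Str.pyGet? g (k0 : Int)).getD '?')).length = 5 := by
          simp [hlen]
        rw [ih _ (k0 + 1) hlen']
        rcases Nat.lt_trichotomy k0 t with hlt | heq | hgt
        · have h1 : k0 + 1 ≤ t := hlt
          have h2 : k0 ≤ t := Nat.le_of_lt hlt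
          have hsub : t - k0 = (t - (k0 + 1)) + 1 := by omega
          have hne : ¬ (k0 = t) := by omega
          simp only [h1, if_true, h2, hsub, List.getElem?_cons_succ]
          cases hrest : rest[t - (k0 + 1)]? with
          | none => simp [hne]
          | some j' =>
            by_cases hyg' : (j' == "yellow" || j' == "grey") = true
            · simp [hyg', hne]
            · simp [hyg']
        · subst heq
          have h1 : ¬ (k0 + 1 ≤ k0) := by omega
          have hsub : k0 - k0 = 0 := by omega
          simp only [h1, if_false, Nat.le_refl, if_true, hsub, List.getElem?_cons_zero]
          simp [hlen, ht, hyg]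
        · have h1 : ¬ (k0 + 1 ≤ t) := by omega
          have h2 : ¬ (k0 ≤ t) := by omega
          have hne : ¬ (k0 = t) := by omega
          simp [h1, h2, hne]
    · -- k0 ≥ 5: the guard fails forever; nothing changes
      simp only [h5, if_false]
      rw [ih out k0 hlen]
      have h2 : ¬ (k0 ≤ t) := by omega
      simp [h2]

-- folding A's per-guess update over the items, viewed at slot t, is B's column fold
theorem kwFold_get (t : Nat) (ht : t < 5) (items : List (String × List String)) :
    ∀ (out : List Char) (c : Char), out.length = 5 → out[t]? = some c →
    (items.foldl (fun acc p => kwInner acc p.1 0 p.2) out)[t]? = some (items.foldl (kwColStep t) c) := by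
  induction items with
  | nil => intro out c _ hc; simpa using hc
  | cons p rest ih =>
    intro out c hlen hc
    simp only [List.foldl_cons]
    have hlen' : (kwInner out p.1 0 p.2).length = 5 := by rw [kwInner_length]; exact hlen
    apply ih _ _ hlen'
    rw [kwInner_get p.1 t ht p.2 out 0 hlen]
    simp only [Nat.zero_le, if_true, Nat.sub_zero]
    cases hj : p.2[t]? with
    | none => simp [kwColStep, hj, hc]
    | some j =>
      by_cases hyg : (j == "yellow" || j == "grey") = true
      · simp [kwColStep, hj, hyg, hc]
      · simp [kwColStep, hj, hyg]

theorem kwFoldLen (l : List (String × List String)) : ∀ (out : List Char),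
    (l.foldl (fun acc p => kwInner acc p.1 0 p.2) out).length = out.length := by
  induction l with
  | nil => intro out; rfl
  | cons q r ihr => intro out; simp only [List.foldl_cons]; rw [ihr, kwInner_length]

theorem known_word_eq_alt (clues : List (String × List String)) :
    known_word clues = known_word_alt clues := by
  let items := (PySem.Dict.ofList clues).items
  let lst : List Char := items.foldl (fun acc p => kwInner acc p.1 0 p.2) ['_', '_', '_', '_', '_']
  show String.mk ((List.range lst.length).foldl (fun s i => s ++ [(lst[i]?.getD '?')]) [])
      = String.mk ((List.range 5).map (kwColLetter items))
  have hlen : lst.length = 5 := kwFoldLen items ['_', '_', '_', '_', '_']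
  have hget : ∀ t : Nat, t < 5 → lst[t]? = some (kwColLetter items t) := by
    intro t ht
    have hinit : (['_', '_', '_', '_', '_'] : List Char)[t]? = some '_' := by
      interval_cases t <;> rfl
    exact kwFold_get t ht items _ '_' rfl hinit
  rw [hlen]
  congr 1
  have hfold : (List.range 5).foldl (fun s i => s ++ [(lst[i]?.getD '?')]) ([] : List Char)
      = (List.range 5).map (fun i => lst[i]?.getD '?') := by
    simpa using PySem.List.foldl_append_singleton_eq_map (l := List.range 5) (f := fun i => lst[i]?.getD '?') (acc := [])
  rw [hfold]
  apply List.map_congr_left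
  intro i hi
  have hi5 : i < 5 := List.mem_range.mp hi
  rw [hget i hi5]
  rfl

-- ===== VERDICT (by name: the statement is the Claim_ definition above) =====
theorem known_word_spec : Claim_equal_known_word := by
  intro clues _ _
  unfold Spec_known_word
  exact known_word_eq_alt clues
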